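-- pv_equiv track=rewrite | github.com/KhuongNguyenDinh/final-thesis | utils.py | list_of_keys_json
-- ===== SOURCE A (Python) =====
-- def flatten(lst):
--     list_final = []
--     for sublist in lst:
--         if isinstance(sublist,list):
--             for i in sublist:
--                 list_final.append(i)
--         else:
--             list_final.append(sublist)
--
--     return list_final
--
-- def list_of_keys_json(jsonfile):
-- # type: list of list
-- # parameter: collection
--     key_lst = []
--     for x in jsonfile:
--         count = key_lst.count(list(x.keys()))
--         if count == 0:
--             key_lst.append(list(x.keys()))
--         else:
--             continue
--     final = flatten(key_lst)
--     return final
-- ===== SOURCE B (Python) =====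
-- def list_of_keys_json(jsonfile):
--     if not jsonfile:
--         return []
--     k = list(jsonfile[0].keys())
--     rest = [x for x in jsonfile[1:] if list(x.keys()) != k]
--     return k + list_of_keys_json(rest)
-- ===== Notes on version B (the rewrite author's own statement) =====
-- stated objective: alternative
-- what changed: B is a head-filter recursion (quicksort-style nub): emit the first dict's key list, remove every later dict with that same key list, and recurse on the filtered rest - no seen collection, no count scan over an accumulator, no intermediate list-of-lists and no flatten pass.
import Mathlib
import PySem

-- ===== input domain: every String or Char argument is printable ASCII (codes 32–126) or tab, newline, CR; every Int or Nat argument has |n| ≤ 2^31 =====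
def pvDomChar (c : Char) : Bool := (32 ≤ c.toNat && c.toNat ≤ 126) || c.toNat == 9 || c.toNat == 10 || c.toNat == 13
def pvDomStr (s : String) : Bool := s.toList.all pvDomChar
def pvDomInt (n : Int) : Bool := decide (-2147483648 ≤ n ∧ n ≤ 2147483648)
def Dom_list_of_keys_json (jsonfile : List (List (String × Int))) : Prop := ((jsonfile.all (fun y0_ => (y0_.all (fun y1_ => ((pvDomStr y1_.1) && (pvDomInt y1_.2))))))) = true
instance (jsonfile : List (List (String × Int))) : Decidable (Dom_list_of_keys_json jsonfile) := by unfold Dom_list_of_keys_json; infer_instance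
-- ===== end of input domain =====

-- B replaces A's accumulator-dedup-then-flatten with a head-filter recursion
-- (emit the first key list, drop its later duplicates, recurse) — objective: alternative.

-- ===== PORT A =====
-- helper 'flatten' of A: every element of key_lst is a list, so the isinstance branch
-- always takes the list arm; ported as the nested append loop over sublists.
def flattenA (lst : List (List String)) : List String :=
  lst.foldl (fun list_final sublist => sublist.foldl (fun acc i => acc ++ [i]) list_final) []

def list_of_keys_json (jsonfile : List (List (String × Int))) : List String :=
  let key_lst : List (List String) :=
    jsonfile.foldl (fun key_lst x =>
      let count := PySem.List.count key_lst (PySem.Dict.ofList x).keys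
      if count == 0 then key_lst ++ [(PySem.Dict.ofList x).keys] else key_lst) []
  flattenA key_lst

-- ===== PORT B =====
def list_of_keys_json_alt : List (List (String × Int)) → List String
  | [] => []
  | x :: t =>
    let k := (PySem.Dict.ofList x).keys
    k ++ list_of_keys_json_alt (t.filter (fun y => (PySem.Dict.ofList y).keys != k))
termination_by js => js.length
decreasing_by
  rw [List.length_unattach]
  exact Nat.lt_succ_of_le (le_of_le_of_eq (List.length_filter_le _ _) List.length_attach)

-- ===== PRECONDITION & SPEC =====
def Spec_list_of_keys_json (jsonfile : List (List (String × Int))) (out : List String) : Prop := out = list_of_keys_json_alt jsonfile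
instance (jsonfile : List (List (String × Int))) (out : List String) : Decidable (Spec_list_of_keys_json jsonfile out) := by unfold Spec_list_of_keys_json; infer_instance

-- ===== CLAIM (what is proved, stated in full; the proofs are below) =====
def Claim_equal_list_of_keys_json : Prop := ∀ (jsonfile : List (List (String × Int))), Dom_list_of_keys_json jsonfile → Spec_list_of_keys_json jsonfile (list_of_keys_json jsonfile)

-- ===== LEMMAS AND PROOFS =====

def keysOf (x : List (String × Int)) : List String := (PySem.Dict.ofList x).keys

-- first-occurrence dedup by head filtering, on lists of key lists
def nubF : List (List String) → List (List String)
  | [] => []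
  | k :: t => k :: nubF (t.filter (fun y => y != k))
termination_by l => l.length
decreasing_by
  rw [List.length_unattach]
  exact Nat.lt_succ_of_le (le_of_le_of_eq (List.length_filter_le _ _) List.length_attach)

-- A's fold, abbreviated (proof-local)
def foldA (js : List (List (String × Int))) (kl : List (List String)) : List (List String) :=
  js.foldl (fun key_lst x =>
    let count := PySem.List.count key_lst (PySem.Dict.ofList x).keys
    if count == 0 then key_lst ++ [(PySem.Dict.ofList x).keys] else key_lst) kl

theorem foldl_append_singleton (sub : List String) (acc : List String) :
    sub.foldl (fun a i => a ++ [i]) acc = acc ++ sub := by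
  induction sub generalizing acc with
  | nil => simp
  | cons h t ih => simp [List.foldl_cons, ih]

theorem flattenA_eq_flatten (l : List (List String)) : flattenA l = l.flatten := by
  unfold flattenA
  suffices h : ∀ acc : List String,
      l.foldl (fun lf sub => sub.foldl (fun a i => a ++ [i]) lf) acc = acc ++ l.flatten by
    simpa using h []
  induction l with
  | nil => simp
  | cons h t ih =>
    intro acc
    rw [List.foldl_cons, foldl_append_singleton, ih]
    simp

-- A's fold equals the head-filter nub of the not-yet-seen key lists
theorem foldA_eq_nubF (js : List (List (String × Int))) (kl : List (List String)) :
    foldA js kl = kl ++ nubF ((js.map keysOf).filter (fun y => !(kl.contains y))) := by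
  induction js generalizing kl with
  | nil => simp [foldA, nubF]
  | cons x t ih =>
    simp only [foldA, List.foldl_cons, List.map_cons, List.filter_cons]
    by_cases hmem : keysOf x ∈ kl
    · have hc : (PySem.List.count kl (PySem.Dict.ofList x).keys == 0) = false := by
        simp [PySem.List.count, List.count_eq_zero]; exact hmem
      have hcont : (!(kl.contains (keysOf x))) = false := by
        simp [List.contains_eq_mem]; exact hmem
      simp only [hc, Bool.false_eq_true, if_false, hcont]
      exact ih kl
    · have hc : (PySem.List.count kl (PySem.Dict.ofList x).keys == 0) = true := by
        simp [PySem.List.count, List.count_eq_zero]; exact hmem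
      have hcont : (!(kl.contains (keysOf x))) = true := by
        simp [List.contains_eq_mem]; exact hmem
      simp only [hc, if_true, hcont]
      have h := ih (kl ++ [keysOf x])
      simp only [foldA, keysOf] at h
      rw [h]
      rw [nubF]
      simp only [List.append_assoc, List.cons_append, List.nil_append,
        List.filter_filter]
      have hp : (fun y => !(kl ++ [(PySem.Dict.ofList x).keys]).contains y)
          = (fun (a : List String) => a != keysOf x && !kl.contains a) := by
        funext y
        by_cases hy : y = keysOf x
        · simp [hy, keysOf, List.contains_eq_mem, bne]
        · have hb : (y == (PySem.Dict.ofList x).keys) = false := by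
            simp [keysOf] at hy ⊢
            exact hy
          simp [keysOf, List.contains_eq_mem, bne, hb]
          exact fun _ => hy
      rw [hp]
      rfl

-- B equals the flattened head-filter nub of all key lists
theorem alt_eq_nubF (js : List (List (String × Int))) :
    list_of_keys_json_alt js = (nubF (js.map keysOf)).flatten := by
  fun_induction list_of_keys_json_alt js with
  | case1 => simp [nubF]
  | case2 x t k ih =>
    simp only [List.unattach_filter, List.unattach_attach] at ih
    rw [List.map_cons, nubF, List.flatten_cons, ih, List.filter_map]
    rfl

-- ===== VERDICT (by name: the statement is the Claim_ definition above) =====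
theorem list_of_keys_json_spec : Claim_equal_list_of_keys_json := by
  intro jsonfile _
  unfold Spec_list_of_keys_json list_of_keys_json
  rw [show (List.foldl (fun key_lst x =>
      let count := PySem.List.count key_lst (PySem.Dict.ofList x).keys
      if count == 0 then key_lst ++ [(PySem.Dict.ofList x).keys] else key_lst) [] jsonfile)
    = foldA jsonfile [] from rfl]
  rw [foldA_eq_nubF, flattenA_eq_flatten, alt_eq_nubF]
  simp
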